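-- pv_equiv track=rewrite | github.com/jcolinpatrick/kryptos | scripts/transposition/e_w_adjacency_search.py | keyword_to_order
-- ===== SOURCE A (Python) =====
-- def keyword_to_order(keyword, width):
--     """Convert a keyword to a column order for a given width.
--     Returns a list of length `width` where order[i] = rank of column i.
--     If keyword is shorter than width, remaining columns get sequential ranks.
--     For width > 26, we cycle through the keyword to fill remaining slots.
--     """
--     kw = keyword.upper()
--
--     if len(kw) < width:
--         # Extend by cycling keyword then appending alphabet
--         extended = kw
--         # First, try padding with unused letters
--         used = set(kw)
--         extras = [chr(c) for c in range(ord('A'), ord('Z')+1) if chr(c) not in used]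
--         extended = kw + ''.join(extras)
--         # If still not enough, cycle with numeric suffixes (just use indices)
--         if len(extended) < width:
--             # Fall back: use keyword repeated then sequential
--             extended = (kw * ((width // len(kw)) + 1))[:width]
--         kw = extended[:width]
--     else:
--         kw = kw[:width]
--
--     # Convert to ranks (alphabetical order, ties broken left-to-right)
--     indexed = [(c, i) for i, c in enumerate(kw)]
--     sorted_indexed = sorted(indexed, key=lambda x: (x[0], x[1]))
--     order = [0] * width
--     for rank, (_, col) in enumerate(sorted_indexed):
--         order[col] = rank
--     return order
-- ===== SOURCE B (Python) =====
-- def keyword_to_order(keyword, width):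
--     """Counting-sort ranking: ranks assigned by one pass over 128 char codes,
--     then a stable left-to-right sweep; no comparison sort."""
--     kw = keyword.upper()
--     if len(kw) < width:
--         used = set(kw)
--         extended = kw + ''.join(chr(c) for c in range(65, 91) if chr(c) not in used)
--         if len(extended) < width:
--             extended = kw * (width // len(kw) + 1)
--         kw = extended
--     kw = kw[:width]
--     counts = [0] * 128
--     for c in kw:
--         counts[ord(c)] += 1
--     ranks = [0] * 128
--     total = 0
--     for code in range(128):
--         ranks[code] = total
--         total += counts[code]
--     order = []
--     for c in kw:
--         order.append(ranks[ord(c)])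
--         ranks[ord(c)] += 1
--     return order
-- ===== Notes on version B (the rewrite author's own statement) =====
-- stated objective: faster
-- what changed: A ranks columns by building (char,index) pairs and running a comparison sort with a tuple key before scattering ranks; B replaces the sort entirely with a stable counting sort over the 128 ASCII codes (histogram, prefix sums, left-to-right sweep).
import Mathlib
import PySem

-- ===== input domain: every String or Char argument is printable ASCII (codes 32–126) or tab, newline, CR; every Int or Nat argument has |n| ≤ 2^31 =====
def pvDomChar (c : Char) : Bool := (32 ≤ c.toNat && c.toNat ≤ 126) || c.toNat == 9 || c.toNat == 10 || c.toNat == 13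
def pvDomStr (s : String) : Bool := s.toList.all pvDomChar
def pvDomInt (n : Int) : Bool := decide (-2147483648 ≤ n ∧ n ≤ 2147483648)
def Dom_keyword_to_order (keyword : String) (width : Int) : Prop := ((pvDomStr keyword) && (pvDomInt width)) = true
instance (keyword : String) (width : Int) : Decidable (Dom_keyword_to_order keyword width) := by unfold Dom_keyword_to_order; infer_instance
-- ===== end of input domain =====

-- B replaces A's comparison sort of (char, index) pairs by a stable counting sort
-- over the 128 ASCII codes (objective: faster ranking pass on wide inputs).

-- ===== PORT A =====
-- keyword extension part of A (lines 'kw = keyword.upper()' … 'kw = kw[:width]' / 'kw = extended[:width]')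
def pvKwA (keyword : String) (width : Int) : List Char :=
  let kw := PySem.Chars.upper keyword.toList
  if (kw.length : Int) < width then
    let used : PySem.Set Char := PySem.Set.ofList kw
    let extras : List Char :=
      ((PySem.List.pyRange 65 91).filter
        (fun c => !(PySem.Set.contains used (Char.ofNat c.toNat)))).map
        (fun c => Char.ofNat c.toNat)
    let extended := kw ++ extras
    let extended2 :=
      if (extended.length : Int) < width then
        PySem.List.slice (PySem.List.pyRepeat kw (PySem.Int.floordiv width (kw.length : Int) + 1)) none (some width)
      else extended
    PySem.List.slice extended2 none (some width)
  else
    PySem.List.slice kw none (some width)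

-- ranking part of A: build (char, index) pairs, sort by the tuple key, scatter ranks
def keyword_to_order (keyword : String) (width : Int) : List Int :=
  let kw := pvKwA keyword width
  let indexed := (PySem.List.enumerate kw).map (fun p => (p.2, p.1))
  let sorted_indexed := PySem.List.sorted2 indexed (fun x => x.1) (fun x => x.2)
  (PySem.List.enumerate sorted_indexed).foldl
    (fun ord rp => PySem.List.pySetD ord rp.2.2 rp.1)
    (List.replicate width.toNat (0 : Int))

-- ===== PORT B =====
-- keyword extension part of B (same task, single trailing [:width])
def pvKwB (keyword : String) (width : Int) : List Char :=
  let kw := PySem.Chars.upper keyword.toList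
  let kw1 :=
    if (kw.length : Int) < width then
      let extended := kw ++
        ((PySem.List.pyRange 65 91).filter
          (fun c => !(PySem.Set.contains (PySem.Set.ofList kw) (Char.ofNat c.toNat)))).map
          (fun c => Char.ofNat c.toNat)
      if (extended.length : Int) < width then
        PySem.List.pyRepeat kw (PySem.Int.floordiv width (kw.length : Int) + 1)
      else extended
    else kw
  PySem.List.slice kw1 none (some width)

-- ranking part of B: counting sort — histogram, prefix sums, stable sweep
def keyword_to_order_alt (keyword : String) (width : Int) : List Int :=
  let kw := pvKwB keyword width
  let counts := kw.foldl
    (fun cnt c => PySem.List.pySetD cnt (c.toNat : Int) (PySem.List.pyGetD cnt (c.toNat : Int) 0 + 1))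
    (List.replicate 128 (0 : Int))
  let rt := (PySem.List.pyRange 0 128).foldl
    (fun (st : List Int × Int) code =>
      (PySem.List.pySetD st.1 code st.2, st.2 + PySem.List.pyGetD counts code 0))
    (List.replicate 128 (0 : Int), 0)
  (kw.foldl
    (fun (st : List Int × List Int) c =>
      (st.1 ++ [PySem.List.pyGetD st.2 (c.toNat : Int) 0],
       PySem.List.pySetD st.2 (c.toNat : Int) (PySem.List.pyGetD st.2 (c.toNat : Int) 0 + 1)))
    ([], rt.1)).1

-- ===== PRECONDITION & SPEC =====
-- Pre_ excludes exactly the inputs where the Python A raises: width < 0 with a keyword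
-- long enough that kw[:width] is nonempty (IndexError on order[col]), and an empty
-- keyword with width > 26 (ZeroDivisionError in width // len(kw)).
def Pre_keyword_to_order (keyword : String) (width : Int) : Prop :=
  (0 ≤ width ∨ (keyword.toList.length : Int) + width ≤ 0) ∧
  (keyword.toList ≠ [] ∨ width ≤ 26)
instance (keyword : String) (width : Int) : Decidable (Pre_keyword_to_order keyword width) := by
  unfold Pre_keyword_to_order; infer_instance

def pvWitness_keyword_to_order : String × Int := ("KRYPTOS", 10)

def Spec_keyword_to_order (keyword : String) (width : Int) (out : List Int) : Prop :=
  out = keyword_to_order_alt keyword width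
instance (keyword : String) (width : Int) (out : List Int) : Decidable (Spec_keyword_to_order keyword width out) := by
  unfold Spec_keyword_to_order; infer_instance

-- ===== CLAIM (what is proved, stated in full; the proofs are below) =====
def Claim_equal_keyword_to_order : Prop :=
  ∀ (keyword : String) (width : Int), Dom_keyword_to_order keyword width →
    Pre_keyword_to_order keyword width →
    Spec_keyword_to_order keyword width (keyword_to_order keyword width)

-- ===== LEMMAS AND PROOFS =====

-- the common mathematical value: rank of column i = #(strictly smaller chars) + #(equal chars before i)
def pvRank (l : List Char) (i : Nat) : Int :=
  (l.countP (fun c => decide (c.toNat < (l.getD i default).toNat)) : Int) +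
  ((l.take i).countP (fun c => c.toNat == (l.getD i default).toNat) : Int)

def pvSpec (l : List Char) : List Int := (List.range l.length).map (pvRank l)

-- ---------- generic helpers ----------

theorem pv_char_lt_iff (c c' : Char) : c < c' ↔ c.toNat < c'.toNat := by
  constructor
  · intro h; exact UInt32.lt_iff_toNat_lt.mp h
  · intro h; exact UInt32.lt_iff_toNat_lt.mpr h

theorem pv_char_le_iff (c c' : Char) : c ≤ c' ↔ c.toNat ≤ c'.toNat := by
  constructor
  · intro h; exact UInt32.le_iff_toNat_le.mp h
  · intro h; exact UInt32.le_iff_toNat_le.mpr h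

theorem pv_char_beq_iff (c c' : Char) : (c == c') = (c.toNat == c'.toNat) := by
  by_cases h : c = c'
  · simp [h]
  · simp [h]
    exact fun hn => h (Char.ext (UInt32.toNat_inj.mp hn))

theorem pv_ofNat_toNat (n : Nat) (h : n < 128) : (Char.ofNat n).toNat = n := by
  rw [Char.toNat_ofNat]; simp [Nat.isValidChar]; omega

-- ---------- A-side: sorted2 is a sort by the lexicographic key ----------

theorem pv_sorted2_eq_sorted_lex (xs : List (Char × Int)) :
    PySem.List.sorted2 xs (fun x => x.1) (fun x => x.2) =
    PySem.List.sorted xs (fun x => toLex x) := by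
  rw [PySem.List.sorted_eq_foldl_insertBy]
  show List.foldl _ [] xs = _
  congr 1
  funext acc x
  congr 1
  funext a b
  by_cases h1 : a.1 < b.1
  · simp [h1, Prod.Lex.lt_iff]
  · by_cases h2 : b.1 < a.1
    · simp [h1, h2, Prod.Lex.lt_iff, (ne_of_gt h2 : a.1 ≠ b.1)]
    · have he : a.1 = b.1 := le_antisymm (not_lt.mp h2) (not_lt.mp h1)
      simp [he, Prod.Lex.lt_iff]

theorem pv_pairwise_lt_of_le_nodup {α κ : Type} [LinearOrder κ] (key : α → κ) (s : List α)
    (hle : s.Pairwise (fun a b => key a ≤ key b)) (hnd : (s.map key).Nodup) :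
    s.Pairwise (fun a b => key a < key b) := by
  rw [List.pairwise_iff_getElem] at hle ⊢
  intro i j hi hj hij
  refine lt_of_le_of_ne (hle i j hi hj hij) ?_
  intro heq
  have h1 : (s.map key)[i]'(by simpa using hi) = (s.map key)[j]'(by simpa using hj) := by
    simpa using heq
  have := (List.Nodup.getElem_inj_iff hnd).mp h1
  omega

theorem pv_pos_eq_countP {α κ : Type} [LinearOrder κ] (key : α → κ) (s : List α)
    (hpw : s.Pairwise (fun a b => key a < key b)) (j : Nat) (hj : j < s.length)
    (x : α) (hx : s[j]'hj = x) :
    s.countP (fun y => decide (key y < key x)) = j := by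
  have hpw' := List.pairwise_iff_getElem.mp hpw
  rw [← List.take_append_drop j s, List.countP_append]
  have h1 : (s.take j).countP (fun y => decide (key y < key x)) = j := by
    rw [List.countP_eq_length.mpr, List.length_take]
    · omega
    · intro a ha
      obtain ⟨m, hm, ham⟩ := List.mem_iff_getElem.mp ha
      have hmj : m < j := by simp [List.length_take] at hm; omega
      have ha2 : a = s[m]'(by omega) := by rw [← ham]; simp [List.getElem_take]
      subst ha2
      have := hpw' m j (by omega) hj hmj
      rw [hx] at this
      simpa using this
  have h2 : (s.drop j).countP (fun y => decide (key y < key x)) = 0 := by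
    rw [List.countP_eq_zero]
    intro a ha
    obtain ⟨m, hm, ham⟩ := List.mem_iff_getElem.mp ha
    have hmlen : j + m < s.length := by simp [List.length_drop] at hm; omega
    have ha2 : a = s[j + m]'(by omega) := by rw [← ham]; simp [List.getElem_drop]
    subst ha2
    rcases Nat.eq_zero_or_pos m with hm0 | hm0
    · subst hm0; simp [← hx]
    · have := hpw' j (j + m) hj (by omega) (by omega)
      rw [hx] at this
      simp [not_lt.mpr (le_of_lt this)]
  omega

-- scatter loop: order[col] = rank, distinct nonnegative columns
theorem pv_scatter_length (s : List (Char × Int)) :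
    ∀ (k : Int) (ord : List Int),
      ((PySem.List.enumerate s k).foldl (fun ord rp => PySem.List.pySetD ord rp.2.2 rp.1) ord).length
        = ord.length := by
  induction s with
  | nil => intro k ord; simp [PySem.List.enumerate]
  | cons p t ih =>
      intro k ord
      rw [PySem.List.enumerate_cons, List.foldl_cons, ih]
      exact PySem.List.length_pySetD _ _ _

theorem pv_scatter_getD (s : List (Char × Int)) (h0 : ∀ q ∈ s, 0 ≤ q.2)
    (hnd : (s.map (fun q => q.2)).Nodup) :
    ∀ (k : Int) (ord : List Int) (i : Nat), i < ord.length →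
      ((PySem.List.enumerate s k).foldl (fun ord rp => PySem.List.pySetD ord rp.2.2 rp.1) ord).getD i 0
      = (match PySem.List.index? (s.map (fun q => q.2)) (i : Int) with
         | some j => k + j
         | none => ord.getD i 0) := by
  induction s with
  | nil =>
      intro k ord i hi
      simp [PySem.List.enumerate, PySem.List.index?]
  | cons p t ih =>
      intro k ord i hi
      have h0p : 0 ≤ p.2 := h0 p (List.mem_cons_self ..)
      have h0t : ∀ q ∈ t, 0 ≤ q.2 := fun q hq => h0 q (List.mem_cons_of_mem _ hq)
      have hndt : (t.map (fun q => q.2)).Nodup := (List.nodup_cons.mp (by simpa using hnd)).2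
      have hmemt : p.2 ∉ t.map (fun q => q.2) := (List.nodup_cons.mp (by simpa using hnd)).1
      rw [PySem.List.enumerate_cons, List.foldl_cons]
      have hset : PySem.List.pySetD ord p.2 k = ord.set p.2.toNat k :=
        PySem.List.pySetD_of_nonneg ord k h0p
      have hi' : i < (PySem.List.pySetD ord p.2 k).length := by
        rwa [PySem.List.length_pySetD]
      rw [ih h0t hndt (k + 1) (PySem.List.pySetD ord p.2 k) i hi']
      by_cases hpi : p.2 = (i : Int)
      · have hidx : PySem.List.index? ((p :: t).map (fun q => q.2)) (i : Int) = some 0 := by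
          rw [List.map_cons, hpi, PySem.List.index?_cons_self]
        have hnone : PySem.List.index? (t.map (fun q => q.2)) (i : Int) = none :=
          (PySem.List.index?_eq_none_iff _ _).mpr (hpi ▸ hmemt)
        rw [hidx, hnone]
        have hpt : p.2.toNat = i := by omega
        simp only [hset, hpt]
        have hilen : i < (ord.set i k).length := by simpa using hi
        rw [List.getD_eq_getElem _ _ hilen, List.getElem_set_self]
        simp
      · have hidx : PySem.List.index? ((p :: t).map (fun q => q.2)) (i : Int) =
            Option.map (fun x => x + 1) (PySem.List.index? (t.map (fun q => q.2)) (i : Int)) := by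
          rw [List.map_cons]
          exact PySem.List.index?_cons_of_ne _ hpi
        rw [hidx]
        cases hcase : PySem.List.index? (t.map (fun q => q.2)) (i : Int) with
        | none =>
            simp only [Option.map_none]
            have hne : p.2.toNat ≠ i := by omega
            have hilen : i < (ord.set p.2.toNat k).length := by simpa using hi
            simp only [hset]
            rw [List.getD_eq_getElem _ _ hilen, List.getElem_set_ne hne,
              List.getD_eq_getElem _ _ hi]
        | some j =>
            simp only [Option.map_some]
            push_cast
            ring

-- counting the lexicographically smaller pairs over enumerate
theorem pv_cEnum0 (c : Char) (l : List Char) :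
    ∀ (s b : Int), b ≤ s →
      (PySem.List.enumerate l s).countP
          (fun q => decide (q.2 < c) || (q.2 == c && decide (q.1 < b)))
        = l.countP (fun x => decide (x < c)) := by
  induction l with
  | nil => intro s b hb; simp [PySem.List.enumerate]
  | cons x t ih =>
      intro s b hb
      rw [PySem.List.enumerate_cons, List.countP_cons, List.countP_cons, ih (s + 1) b (by omega)]
      have : ¬ (s < b) := by omega
      simp [this]

theorem pv_cEnum (c : Char) (l : List Char) :
    ∀ (s : Int) (i : Nat),
      (PySem.List.enumerate l s).countP
          (fun q => decide (q.2 < c) || (q.2 == c && decide (q.1 < s + (i : Int))))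
        = l.countP (fun x => decide (x < c)) + (l.take i).countP (fun x => x == c) := by
  induction l with
  | nil => intro s i; simp [PySem.List.enumerate]
  | cons x t ih =>
      intro s i
      rw [PySem.List.enumerate_cons, List.countP_cons]
      cases i with
      | zero =>
          simp only [Nat.cast_zero, add_zero]
          rw [pv_cEnum0 c t (s + 1) s (by omega)]
          simp [List.countP_cons]
      | succ i' =>
          have harg : (fun (q : Int × Char) => decide (q.2 < c) || (q.2 == c && decide (q.1 < s + ((i' + 1 : Nat) : Int))))
              = (fun (q : Int × Char) => decide (q.2 < c) || (q.2 == c && decide (q.1 < (s + 1) + ((i' : Nat) : Int)))) := by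
            funext q; congr 2; push_cast; ring_nf
          rw [harg, ih (s + 1) i']
          have hx : (decide (x < c) || (x == c && decide (s < s + ((i' + 1 : Nat) : Int)))) = (decide (x < c) || (x == c)) := by
            simp
          rw [hx]
          simp only [List.take_succ_cons, List.countP_cons, List.countP_cons]
          by_cases hlt : x < c
          · have hne : ¬ (x = c) := ne_of_lt hlt
            simp [hlt, hne]; omega
          · by_cases heq : x = c
            · simp [heq]; omega
            · simp [heq]
              omega

-- A's ranking pass computes pvSpec
theorem pv_coreA_spec (l : List Char) (width : Int) (hlen : l.length = width.toNat) :
    (PySem.List.enumerate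
        (PySem.List.sorted2 ((PySem.List.enumerate l).map (fun p => (p.2, p.1)))
          (fun x => x.1) (fun x => x.2))).foldl
      (fun ord rp => PySem.List.pySetD ord rp.2.2 rp.1)
      (List.replicate width.toNat (0 : Int)) = pvSpec l := by
  set indexed := (PySem.List.enumerate l).map (fun p => (p.2, p.1)) with hidx
  set s := PySem.List.sorted2 indexed (fun x => x.1) (fun x => x.2) with hs
  have hsorted : s = PySem.List.sorted indexed (fun x => toLex x) := by
    rw [hs]; exact pv_sorted2_eq_sorted_lex indexed
  have hperm : s.Perm indexed := by
    rw [hsorted]; exact PySem.List.sorted_perm ..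
  have hsnd : indexed.map (fun q => q.2) = (PySem.List.enumerate l).map (fun p => p.1) := by
    rw [hidx, List.map_map]; rfl
  have hfst := PySem.List.map_fst_enumerate l 0
  have hnd_idx : (indexed.map (fun q => q.2)).Nodup := by
    rw [hsnd, hfst]; exact PySem.List.nodup_pyRange_one _ _
  have hnd_s : (s.map (fun q => q.2)).Nodup := ((hperm.map _).nodup_iff).mpr hnd_idx
  have h0 : ∀ q ∈ s, 0 ≤ q.2 := by
    intro q hq
    have hq2 : q ∈ indexed := hperm.mem_iff.mp hq
    rw [hidx] at hq2
    obtain ⟨p, hp, hpe⟩ := List.mem_map.mp hq2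
    obtain ⟨k, hk, rfl⟩ := (PySem.List.mem_enumerate_iff l 0 p).mp hp
    rw [← hpe]
    simp
  have hlen_s : s.length = l.length := by
    rw [hperm.length_eq, hidx]; simp
  have hpw_le : s.Pairwise (fun a b => (fun x : Char × Int => toLex x) a ≤ (fun x : Char × Int => toLex x) b) := by
    rw [hsorted]; exact PySem.List.sorted_pairwise indexed _
  have hnd_sl : (s.map (fun x : Char × Int => toLex x)).Nodup := by
    refine List.Nodup.map (fun a b h => ?_) (List.Nodup.of_map _ hnd_s)
    simpa using h
  have hpw : s.Pairwise (fun a b => toLex a < toLex b) :=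
    pv_pairwise_lt_of_le_nodup _ s hpw_le hnd_sl
  apply List.ext_getElem
  · rw [pv_scatter_length]
    simp [pvSpec, hlen]
  · intro i hi1 hi2
    have hi : i < l.length := by
      have := hi2; simpa [pvSpec] using this
    have hrep : i < (List.replicate width.toNat (0 : Int)).length := by
      simp; omega
    rw [← List.getD_eq_getElem _ 0 hi1]
    rw [pv_scatter_getD s h0 hnd_s 0 (List.replicate width.toNat 0) i hrep]
    have hmem : (i : Int) ∈ s.map (fun q => q.2) := by
      rw [(hperm.map (fun q => q.2)).mem_iff, hsnd, hfst, PySem.List.mem_pyRange_one]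
      constructor
      · omega
      · omega
    cases hcase : PySem.List.index? (s.map (fun q => q.2)) (i : Int) with
    | none =>
        exact absurd hmem ((PySem.List.index?_eq_none_iff _ _).mp hcase)
    | some j =>
        obtain ⟨hjlen, hjval, _⟩ := PySem.List.getElem_of_index?_eq_some hcase
        have hjs : j < s.length := by simpa using hjlen
        have hsj2 : (s[j]'hjs).2 = (i : Int) := by
          have := hjval; rwa [List.getElem_map] at this
        have hsj_mem : s[j]'hjs ∈ indexed := hperm.mem_iff.mp (List.getElem_mem _)
        rw [hidx] at hsj_mem
        obtain ⟨p, hp, hpeq⟩ := List.mem_map.mp hsj_mem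
        obtain ⟨k, hk, rfl⟩ := (PySem.List.mem_enumerate_iff l 0 p).mp hp
        have hki : k = i := by
          rw [← hpeq] at hsj2; simp at hsj2; omega
        subst hki
        have hsj : s[j]'hjs = (l[k]'hk, (k : Int)) := by
          rw [← hpeq]; simp
        have hcount := pv_pos_eq_countP (fun x : Char × Int => toLex x) s hpw j hjs
          (l[k]'hk, (k : Int)) hsj
        rw [hperm.countP_eq, hidx, List.countP_map] at hcount
        have hpred : ∀ q ∈ PySem.List.enumerate l 0,
            ((fun y : Char × Int => decide (toLex y < toLex (l[k]'hk, (k : Int)))) ∘ (fun p : Int × Char => (p.2, p.1))) q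
            = (fun q : Int × Char => decide (q.2 < l[k]'hk) || (q.2 == l[k]'hk && decide (q.1 < (0 : Int) + (k : Int)))) q := by
          intro q _
          simp only [Function.comp_apply]
          by_cases h1 : q.2 < l[k]'hk
          · simp [Prod.Lex.lt_iff, h1]
          · by_cases h2 : q.2 = l[k]'hk
            · simp [Prod.Lex.lt_iff, h2]
            · simp [Prod.Lex.lt_iff, h1, h2]
        rw [List.countP_congr (fun a ha => by rw [hpred a ha]), pv_cEnum (l[k]'hk) l 0 k] at hcount
        have hspec : (pvSpec l)[k]'hi2 = pvRank l k := by
          simp [pvSpec]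
        rw [hspec]
        unfold pvRank
        rw [List.getD_eq_getElem _ _ hk]
        have hcp1 : l.countP (fun x => decide (x < l[k]'hk))
            = l.countP (fun c => decide (c.toNat < (l[k]'hk).toNat)) :=
          List.countP_congr (fun a _ => by simp [pv_char_lt_iff])
        have hcp2 : (l.take k).countP (fun x => x == l[k]'hk)
            = (l.take k).countP (fun c => c.toNat == (l[k]'hk).toNat) :=
          List.countP_congr (fun a _ => by rw [pv_char_beq_iff])
        rw [hcp1, hcp2] at hcount
        dsimp only
        rw [← hcount]
        push_cast
        ring

-- ---------- B-side: counting sort computes pvSpec ----------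

theorem pv_counts_length (l : List Char) :
    ∀ (cnt : List Int),
      (l.foldl (fun cnt c => PySem.List.pySetD cnt (c.toNat : Int) (PySem.List.pyGetD cnt (c.toNat : Int) 0 + 1)) cnt).length
        = cnt.length := by
  induction l with
  | nil => intro cnt; simp
  | cons x t ih =>
      intro cnt
      rw [List.foldl_cons, ih, PySem.List.length_pySetD]

theorem pv_counts_getD (l : List Char) (hc : ∀ c ∈ l, c.toNat < 128) :
    ∀ (cnt : List Int), cnt.length = 128 → ∀ (k : Nat), k < 128 →
      (l.foldl (fun cnt c => PySem.List.pySetD cnt (c.toNat : Int) (PySem.List.pyGetD cnt (c.toNat : Int) 0 + 1)) cnt).getD k 0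
        = cnt.getD k 0 + (l.countP (fun c => c.toNat == k) : Int) := by
  induction l with
  | nil => intro cnt hlen k hk; simp
  | cons x t ih =>
      intro cnt hlen k hk
      have hx : x.toNat < 128 := hc x (List.mem_cons_self ..)
      have hct : ∀ c ∈ t, c.toNat < 128 := fun c h => hc c (List.mem_cons_of_mem _ h)
      rw [List.foldl_cons]
      have hstep : PySem.List.pySetD cnt (x.toNat : Int) (PySem.List.pyGetD cnt (x.toNat : Int) 0 + 1)
          = cnt.set x.toNat (cnt.getD x.toNat 0 + 1) := by
        rw [PySem.List.pyGetD_natCast, PySem.List.pySetD_of_nonneg _ _ (Int.natCast_nonneg _)]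
        simp
      rw [hstep, ih hct _ (by simpa using hlen) k hk]
      by_cases hxk : x.toNat = k
      · have h1 : (cnt.set x.toNat (cnt.getD x.toNat 0 + 1)).getD k 0 = cnt.getD k 0 + 1 := by
          rw [hxk]
          have hk' : k < (cnt.set k (cnt.getD k 0 + 1)).length := by simp; omega
          rw [List.getD_eq_getElem _ _ hk', List.getElem_set_self]
        rw [h1, List.countP_cons]
        simp [hxk]
        ring
      · have h1 : (cnt.set x.toNat (cnt.getD x.toNat 0 + 1)).getD k 0 = cnt.getD k 0 := by
          have hk' : k < (cnt.set x.toNat (cnt.getD x.toNat 0 + 1)).length := by simp; omega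
          rw [List.getD_eq_getElem _ _ hk', List.getElem_set_ne hxk]
          exact (List.getD_eq_getElem _ _ (by omega)).symm
        rw [h1, List.countP_cons]
        simp [hxk]

theorem pv_getD_set_self (st : List Int) (k : Nat) (v : Int) (hk : k < st.length) :
    (st.set k v).getD k 0 = v := by
  rw [List.getD_eq_getElem _ _ (by simpa using hk), List.getElem_set_self]

theorem pv_getD_set_ne (st : List Int) (m k : Nat) (v : Int) (h : m ≠ k) (hk : k < st.length) :
    (st.set m v).getD k 0 = st.getD k 0 := by
  rw [List.getD_eq_getElem _ _ (by simpa using hk), List.getElem_set_ne h]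
  exact (List.getD_eq_getElem _ _ hk).symm

theorem pv_countP_lt_succ (l : List Char) (k : Nat) :
    l.countP (fun c => decide (c.toNat < k + 1)) =
      l.countP (fun c => decide (c.toNat < k)) + l.countP (fun c => c.toNat == k) := by
  induction l with
  | nil => simp
  | cons x t ih =>
      simp only [List.countP_cons, ih]
      by_cases h1 : x.toNat < k
      · have h2 : x.toNat ≠ k := by omega
        have h3 : x.toNat < k + 1 := by omega
        simp [h1, h2, h3]
        omega
      · by_cases h2 : x.toNat = k
        · have h3 : x.toNat < k + 1 := by omega
          simp [h2]
          omega
        · have h3 : ¬ (x.toNat < k + 1) := by omega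
          simp [h1, h2, h3]

-- the prefix-sum loop: ranks[k] = sum of counts below k
theorem pv_ranks_aux (cnt : List Int) (hcl : cnt.length = 128) :
    ∀ (n a : Nat), a + n = 128 → ∀ (st : List Int), st.length = 128 →
      (((PySem.List.pyRange (a : Int) 128).foldl
          (fun (st : List Int × Int) code =>
            (PySem.List.pySetD st.1 code st.2, st.2 + PySem.List.pyGetD cnt code 0))
          (st, (cnt.take a).sum)).1.length = 128) ∧
      (∀ (k : Nat), k < 128 →
        ((PySem.List.pyRange (a : Int) 128).foldl
          (fun (st : List Int × Int) code =>
            (PySem.List.pySetD st.1 code st.2, st.2 + PySem.List.pyGetD cnt code 0))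
          (st, (cnt.take a).sum)).1.getD k 0
        = if a ≤ k then (cnt.take k).sum else st.getD k 0) := by
  intro n
  induction n with
  | zero =>
      intro a ha st hst
      have ha' : a = 128 := by omega
      subst ha'
      have hempty : PySem.List.pyRange ((128 : Nat) : Int) 128 = [] := by
        rw [PySem.List.pyRange_one]
        norm_num
      rw [hempty]
      refine ⟨hst, ?_⟩
      intro k hk
      have : ¬ ((128 : Nat) ≤ k) := by omega
      simp [this]
  | succ n ih =>
      intro a ha st hst
      have halt : ((a : Nat) : Int) < 128 := by exact_mod_cast (by omega : a < 128)
      rw [PySem.List.pyRange_one_cons halt, List.foldl_cons]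
      have hset : PySem.List.pySetD st ((a : Nat) : Int) ((cnt.take a).sum)
          = st.set a ((cnt.take a).sum) := by
        rw [PySem.List.pySetD_of_nonneg _ _ (Int.natCast_nonneg _)]
        simp
      have hget : PySem.List.pyGetD cnt ((a : Nat) : Int) 0 = cnt[a]'(by omega) := by
        rw [PySem.List.pyGetD_natCast]
        exact List.getD_eq_getElem _ _ (by omega)
      have hsum : (cnt.take a).sum + PySem.List.pyGetD cnt ((a : Nat) : Int) 0
          = (cnt.take (a + 1)).sum := by
        rw [hget, List.sum_take_succ _ _ (by omega)]
      have hcast : ((a : Nat) : Int) + 1 = (((a + 1 : Nat)) : Int) := by omega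
      rw [hset, hsum, hcast]
      obtain ⟨ihlen, ihget⟩ := ih (a + 1) (by omega) (st.set a ((cnt.take a).sum)) (by simpa using hst)
      refine ⟨ihlen, ?_⟩
      intro k hk
      rw [ihget k hk]
      by_cases h1 : a + 1 ≤ k
      · have h2 : a ≤ k := by omega
        simp [h1, h2]
      · by_cases h2 : a = k
        · subst h2
          rw [if_neg h1, if_pos (le_refl a), pv_getD_set_self st a _ (by omega)]
        · have h3 : ¬ (a ≤ k) := by omega
          rw [if_neg h1, if_neg h3, pv_getD_set_ne st a k _ h2 (by omega)]

-- prefix sums of the histogram count the strictly-smaller characters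
theorem pv_psum_counts (l : List Char) (hc : ∀ c ∈ l, c.toNat < 128) :
    ∀ (k : Nat), k ≤ 128 →
      (((l.foldl (fun cnt c => PySem.List.pySetD cnt (c.toNat : Int) (PySem.List.pyGetD cnt (c.toNat : Int) 0 + 1))
          (List.replicate 128 (0 : Int))).take k).sum)
        = (l.countP (fun c => decide (c.toNat < k)) : Int) := by
  intro k
  induction k with
  | zero =>
      intro _
      simp
  | succ k ih =>
      intro hk
      have hlen : (l.foldl (fun cnt c => PySem.List.pySetD cnt (c.toNat : Int) (PySem.List.pyGetD cnt (c.toNat : Int) 0 + 1))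
          (List.replicate 128 (0 : Int))).length = 128 := by
        rw [pv_counts_length]; simp
      rw [List.sum_take_succ _ _ (by omega), ih (by omega)]
      have hgetD := pv_counts_getD l hc (List.replicate 128 (0 : Int)) (by simp) k (by omega)
      rw [List.getD_eq_getElem _ _ (by omega)] at hgetD
      rw [hgetD]
      have hrep : (List.replicate 128 (0 : Int)).getD k 0 = 0 := by
        rw [List.getD_eq_getElem _ _ (by simp; omega), List.getElem_replicate]
      rw [hrep, pv_countP_lt_succ]
      push_cast
      ring

-- the rank table before the sweep
def pvBase (l pre : List Char) : List Int :=
  (List.range 128).map (fun k =>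
    (l.countP (fun c => decide (c.toNat < k)) : Int) + (pre.countP (fun c => c.toNat == k) : Int))

theorem pv_base_length (l pre : List Char) : (pvBase l pre).length = 128 := by
  simp [pvBase]

theorem pv_base_getD (l pre : List Char) (k : Nat) (hk : k < 128) :
    (pvBase l pre).getD k 0
      = (l.countP (fun c => decide (c.toNat < k)) : Int) + (pre.countP (fun c => c.toNat == k) : Int) := by
  rw [List.getD_eq_getElem _ _ (by simp [pvBase]; omega)]
  simp [pvBase]

theorem pv_ranks_eq_base (l : List Char) (hc : ∀ c ∈ l, c.toNat < 128) :
    ((PySem.List.pyRange 0 128).foldl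
      (fun (st : List Int × Int) code =>
        (PySem.List.pySetD st.1 code st.2,
         st.2 + PySem.List.pyGetD
           (l.foldl (fun cnt c => PySem.List.pySetD cnt (c.toNat : Int) (PySem.List.pyGetD cnt (c.toNat : Int) 0 + 1))
             (List.replicate 128 (0 : Int))) code 0))
      (List.replicate 128 (0 : Int), 0)).1 = pvBase l [] := by
  have hcl : (l.foldl (fun cnt c => PySem.List.pySetD cnt (c.toNat : Int) (PySem.List.pyGetD cnt (c.toNat : Int) 0 + 1))
      (List.replicate 128 (0 : Int))).length = 128 := by
    rw [pv_counts_length]; simp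
  have h := pv_ranks_aux _ hcl 128 0 (by omega) (List.replicate 128 (0 : Int)) (by simp)
  simp only [Nat.cast_zero, List.take_zero, List.sum_nil] at h
  obtain ⟨hlen, hget⟩ := h
  apply List.ext_getElem
  · rw [hlen, pv_base_length]
  · intro i hi hi2
    have hi128 : i < 128 := by rwa [hlen] at hi
    rw [← List.getD_eq_getElem _ 0 hi, ← List.getD_eq_getElem _ 0 hi2]
    rw [hget i hi128, pv_base_getD l [] i hi128, if_pos (Nat.zero_le i),
      pv_psum_counts l hc i (by omega)]
    simp

-- the sweep emits the ranks left to right, bumping the table as it goes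
theorem pv_base_step (l pre : List Char) (c : Char) (_hcl : c.toNat < 128) :
    (pvBase l pre).set c.toNat ((pvBase l pre).getD c.toNat 0 + 1) = pvBase l (pre ++ [c]) := by
  apply List.ext_getElem
  · simp [pv_base_length]
  · intro k hk1 hk2
    have hk : k < 128 := by simpa [pv_base_length] using hk2
    rw [← List.getD_eq_getElem _ 0 hk1, ← List.getD_eq_getElem _ 0 hk2]
    by_cases hek : c.toNat = k
    · rw [hek, pv_getD_set_self _ _ _ (by rw [pv_base_length]; omega)]
      rw [pv_base_getD l pre k hk, pv_base_getD l (pre ++ [c]) k hk]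
      rw [List.countP_append]
      have : ([c].countP (fun c => c.toNat == k)) = 1 := by simp [hek]
      rw [this]
      push_cast
      ring
    · rw [pv_getD_set_ne _ _ _ _ hek (by rw [pv_base_length]; omega)]
      rw [pv_base_getD l pre k hk, pv_base_getD l (pre ++ [c]) k hk]
      rw [List.countP_append]
      have : ([c].countP (fun c => c.toNat == k)) = 0 := by simp [hek]
      rw [this]
      simp

theorem pv_sweep (l : List Char) (hc : ∀ c ∈ l, c.toNat < 128) :
    ∀ (rem pre : List Char) (acc : List Int), pre ++ rem = l →
      (rem.foldl
        (fun (st : List Int × List Int) c =>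
          (st.1 ++ [PySem.List.pyGetD st.2 (c.toNat : Int) 0],
           PySem.List.pySetD st.2 (c.toNat : Int) (PySem.List.pyGetD st.2 (c.toNat : Int) 0 + 1)))
        (acc, pvBase l pre)).1
      = acc ++ (List.range rem.length).map (fun j => pvRank l (pre.length + j)) := by
  intro rem
  induction rem with
  | nil => intro pre acc _; simp
  | cons c t ih =>
      intro pre acc hl
      have hcl : c.toNat < 128 := hc c (by rw [← hl]; exact List.mem_append_right _ (List.mem_cons_self ..))
      rw [List.foldl_cons]
      dsimp only
      have hgd : PySem.List.pyGetD (pvBase l pre) (c.toNat : Int) 0 = (pvBase l pre).getD c.toNat 0 := by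
        rw [PySem.List.pyGetD_natCast]
      have hsd : PySem.List.pySetD (pvBase l pre) (c.toNat : Int) ((pvBase l pre).getD c.toNat 0 + 1)
          = pvBase l (pre ++ [c]) := by
        rw [PySem.List.pySetD_of_nonneg _ _ (Int.natCast_nonneg _)]
        simp only [Int.toNat_natCast]
        exact pv_base_step l pre c hcl
      have hv : (pvBase l pre).getD c.toNat 0 = pvRank l pre.length := by
        rw [pv_base_getD l pre c.toNat hcl]
        unfold pvRank
        have hgl : l.getD pre.length default = c := by
          rw [← hl]
          rw [List.getD_eq_getElem?_getD, List.getElem?_append_right (le_refl pre.length)]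
          simp
        have htk : l.take pre.length = pre := by
          rw [← hl, List.take_left]
        rw [hgl, htk]
      rw [hgd, hsd, hv]
      rw [ih (pre ++ [c]) (acc ++ [pvRank l pre.length]) (by simpa using hl)]
      simp only [List.length_cons]
      rw [List.range_succ_eq_map, List.map_cons, List.map_map]
      have hm : ((List.range t.length).map ((fun j => pvRank l (pre.length + j)) ∘ Nat.succ))
          = (List.range t.length).map (fun j => pvRank l ((pre ++ [c]).length + j)) := by
        apply List.map_congr_left
        intro j _
        have harg : pre.length + Nat.succ j = (pre ++ [c]).length + j := by
          simp only [List.length_append, List.length_cons, List.length_nil]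
          omega
        show pvRank l (pre.length + Nat.succ j) = pvRank l ((pre ++ [c]).length + j)
        rw [harg]
      rw [← hm]
      simp

theorem pv_coreB_spec (l : List Char) (hc : ∀ c ∈ l, c.toNat < 128) :
    (l.foldl
      (fun (st : List Int × List Int) c =>
        (st.1 ++ [PySem.List.pyGetD st.2 (c.toNat : Int) 0],
         PySem.List.pySetD st.2 (c.toNat : Int) (PySem.List.pyGetD st.2 (c.toNat : Int) 0 + 1)))
      ([],
        ((PySem.List.pyRange 0 128).foldl
          (fun (st : List Int × Int) code =>
            (PySem.List.pySetD st.1 code st.2, st.2 + PySem.List.pyGetD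
              (l.foldl (fun cnt c => PySem.List.pySetD cnt (c.toNat : Int) (PySem.List.pyGetD cnt (c.toNat : Int) 0 + 1))
                (List.replicate 128 (0 : Int))) code 0))
          (List.replicate 128 (0 : Int), 0)).1)).1 = pvSpec l := by
  rw [pv_ranks_eq_base l hc]
  rw [pv_sweep l hc l [] [] rfl]
  unfold pvSpec
  simp

-- ---------- the keyword lists agree and are well-shaped ----------

theorem pv_upperChar_lt (c : Char) (h : c.toNat < 128) :
    (PySem.Chars.upperChar c).toNat < 128 := by
  unfold PySem.Chars.upperChar
  split_ifs with hl
  · have hl' : 'a' ≤ c ∧ c ≤ 'z' := by simpa [PySem.Chars.islower] using hl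
    have h1 : 97 ≤ c.toNat := (pv_char_le_iff 'a' c).mp hl'.1
    have h2 : c.toNat ≤ 122 := (pv_char_le_iff c 'z').mp hl'.2
    rw [pv_ofNat_toNat _ (by omega)]
    omega
  · exact h

theorem pv_upper_codes (keyword : String) (hdom : Dom_keyword_to_order keyword width) :
    ∀ c ∈ PySem.Chars.upper keyword.toList, c.toNat < 128 := by
  intro c hc
  obtain ⟨c0, hc0, rfl⟩ := List.mem_map.mp hc
  apply pv_upperChar_lt
  unfold Dom_keyword_to_order at hdom
  have hstr : pvDomStr keyword = true := by
    simp only [Bool.and_eq_true] at hdom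
    exact hdom.1
  unfold pvDomStr at hstr
  have := List.all_eq_true.mp hstr c0 hc0
  simp only [pvDomChar, Bool.or_eq_true, Bool.and_eq_true, decide_eq_true_eq, beq_iff_eq] at this
  omega

theorem pv_kw_eq (keyword : String) (width : Int) :
    pvKwA keyword width = pvKwB keyword width := by
  simp only [pvKwA, pvKwB]
  split_ifs with h1 h2
  · have hw : 0 ≤ width := by
      have := Int.natCast_nonneg (PySem.Chars.upper keyword.toList).length
      omega
    rw [PySem.List.slice_to _ hw, PySem.List.slice_to _ hw, List.take_take, min_self]
  · rfl
  · rfl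

theorem pv_repeat_length {α : Type} (xs : List α) (n : Int) :
    (PySem.List.pyRepeat xs n).length = n.toNat * xs.length := by
  simp [PySem.List.pyRepeat, List.length_flatten]

theorem pv_kw_len (keyword : String) (width : Int) (hpre : Pre_keyword_to_order keyword width) :
    (pvKwA keyword width).length = width.toNat := by
  obtain ⟨hp1, hp2⟩ := hpre
  have hul : (PySem.Chars.upper keyword.toList).length = keyword.toList.length := by
    simp [PySem.Chars.upper]
  simp only [pvKwA]
  split_ifs with h1 h2
  · -- fallback branch: keyword repeated
    have hw : 0 ≤ width := by
      have := Int.natCast_nonneg (PySem.Chars.upper keyword.toList).length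
      omega
    have hkw0 : keyword.toList ≠ [] := by
      intro hnil
      have hupnil : PySem.Chars.upper keyword.toList = [] := by simp [PySem.Chars.upper, hnil]
      rw [hupnil] at h2
      have h26 : (([] : List Char) ++
          ((PySem.List.pyRange 65 91).filter
            (fun c => !(PySem.Set.contains (PySem.Set.ofList ([] : List Char)) (Char.ofNat c.toNat)))).map
            (fun c => Char.ofNat c.toNat)).length = 26 := by decide
      rw [h26] at h2
      rcases hp2 with hne | hle
      · exact hne hnil
      · omega
    have hlpos : 0 < (PySem.Chars.upper keyword.toList).length := by
      rw [hul]
      cases hkl : keyword.toList with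
      | nil => exact absurd hkl hkw0
      | cons a b => simp
    set len : Int := ((PySem.Chars.upper keyword.toList).length : Int) with hlen
    have hlpos' : 0 < len := by omega
    set fd := PySem.Int.floordiv width len with hfd
    have hmul := PySem.Int.floordiv_mul_add_mod width len
    have hm0 : 0 ≤ PySem.Int.mod width len := PySem.Int.mod_nonneg _ hlpos'
    have hmlt : PySem.Int.mod width len < len := PySem.Int.mod_lt _ hlpos'
    rw [← hfd] at hmul
    have hfd0 : 0 ≤ fd := by
      by_contra hneg
      have hle : fd ≤ -1 := by omega
      have := mul_le_mul_of_nonneg_right hle (le_of_lt hlpos')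
      rw [neg_one_mul] at this
      have hwid : 0 < width := by omega
      omega
    have hbig : width ≤ (fd + 1) * len := by
      have : (fd + 1) * len = fd * len + len := by ring
      omega
    have hreplen : (PySem.List.pyRepeat (PySem.Chars.upper keyword.toList) (fd + 1)).length
        = (fd + 1).toNat * (PySem.Chars.upper keyword.toList).length :=
      pv_repeat_length _ _
    have hrep_ge : width.toNat ≤ (PySem.List.pyRepeat (PySem.Chars.upper keyword.toList) (fd + 1)).length := by
      rw [hreplen]
      have hq : ((fd + 1).toNat : Int) = fd + 1 := Int.toNat_of_nonneg (by omega)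
      have : width ≤ ((fd + 1).toNat : Int) * len := by rw [hq]; exact hbig
      rw [hlen] at this
      omega
    rw [PySem.List.slice_to _ hw, PySem.List.slice_to _ hw, List.take_take, min_self,
      List.length_take]
    omega
  · -- extended with unused alphabet letters is already long enough
    have hw : 0 ≤ width := by
      have := Int.natCast_nonneg (PySem.Chars.upper keyword.toList).length
      omega
    rw [PySem.List.slice_to _ hw, List.length_take]
    omega
  · -- keyword at least as long as width (or width nonpositive)
    by_cases hw : 0 ≤ width
    · rw [PySem.List.slice_to _ hw, List.length_take]
      omega
    · have hneg : width < 0 := by omega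
      have hz : keyword.toList.length + width ≤ 0 := by omega
      have hempty : PySem.List.slice (PySem.Chars.upper keyword.toList) none (some width) = [] := by
        simp only [PySem.List.slice, PySem.List.clampIdx]
        rw [if_pos hneg]
        split_ifs with hc
        · simp
        · have : ((PySem.Chars.upper keyword.toList).length : Int) + width = 0 := by omega
          rw [this]
          simp
      rw [hempty]
      simp
      omega

theorem pv_kw_codes (keyword : String) (width : Int) (hdom : Dom_keyword_to_order keyword width) :
    ∀ c ∈ pvKwB keyword width, c.toNat < 128 := by
  intro c hc
  have hup := pv_upper_codes keyword hdom
  simp only [pvKwB, PySem.List.slice] at hc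
  have hc1 := List.mem_of_mem_drop (List.mem_of_mem_take hc)
  split_ifs at hc1 with h1 h2
  · -- pyRepeat
    simp only [PySem.List.pyRepeat, List.mem_flatten] at hc1
    obtain ⟨lmem, hlmem, hcmem⟩ := hc1
    rw [List.eq_of_mem_replicate hlmem] at hcmem
    exact hup c hcmem
  · rcases List.mem_append.mp hc1 with hkw | hex
    · exact hup c hkw
    · obtain ⟨m, hm, rfl⟩ := List.mem_map.mp hex
      have hm' := List.mem_filter.mp hm
      have hrange := (PySem.List.mem_pyRange_one).mp hm'.1
      rw [pv_ofNat_toNat _ (by omega)]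
      omega
  · exact hup c hc1

-- ===== VERDICT (by name: the statement is the Claim_ definition above) =====
theorem keyword_to_order_spec : Claim_equal_keyword_to_order := by
  intro keyword width hdom hpre
  unfold Spec_keyword_to_order
  show keyword_to_order keyword width = keyword_to_order_alt keyword width
  unfold keyword_to_order keyword_to_order_alt
  rw [pv_kw_eq keyword width]
  rw [pv_coreA_spec (pvKwB keyword width) width
    (by rw [← pv_kw_eq keyword width]; exact pv_kw_len keyword width hpre)]
  rw [pv_coreB_spec (pvKwB keyword width) (pv_kw_codes keyword width hdom)]
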